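-- pv_equiv track=rewrite | github.com/zhenga1/cs185_final_project_llm_rl | scripts/modal_train.py | _is_wandb_enabled
-- ===== SOURCE A (Python) =====
-- def _is_wandb_enabled(args: tuple[str, ...] | list[str]) -> bool:
--     enabled = True
--     for token in args:
--         if token == "--no-wandb_enabled":
--             enabled = False
--         elif token == "--wandb_enabled":
--             enabled = True
--     return enabled
-- ===== SOURCE B (Python) =====
-- def _is_wandb_enabled(args):
--     for token in reversed(args):
--         if token == "--wandb_enabled":
--             return True
--         if token == "--no-wandb_enabled":
--             return False
--     return True
-- ===== Notes on version B (the rewrite author's own statement) =====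
-- stated objective: idiomatic
-- what changed: Replaces the full forward scan with a mutable accumulator by a reversed-order early-return search for the last relevant flag, defaulting to True.
import Mathlib
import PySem

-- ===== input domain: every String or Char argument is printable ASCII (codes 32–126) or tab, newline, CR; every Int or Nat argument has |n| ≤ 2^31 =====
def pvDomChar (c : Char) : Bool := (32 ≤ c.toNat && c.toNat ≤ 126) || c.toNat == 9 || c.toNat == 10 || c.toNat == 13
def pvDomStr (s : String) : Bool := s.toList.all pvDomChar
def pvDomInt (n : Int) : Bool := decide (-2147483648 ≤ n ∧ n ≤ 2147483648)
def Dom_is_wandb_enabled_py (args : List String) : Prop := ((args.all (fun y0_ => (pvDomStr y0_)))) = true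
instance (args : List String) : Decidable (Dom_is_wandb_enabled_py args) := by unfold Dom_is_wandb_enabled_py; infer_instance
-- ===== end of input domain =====

-- B replaces A's forward scan with a mutable flag by a reversed early-return search (last flag wins); return value only, no side effects.

-- ===== PORT A =====
def is_wandb_enabled_py (args : List String) : Bool :=
  args.foldl (fun enabled token =>
    if token == "--no-wandb_enabled" then false
    else if token == "--wandb_enabled" then true
    else enabled) true

-- ===== PORT B =====
-- scan of reversed(args), returning at the first relevant flag
def pvRevScan (xs : List String) : Bool :=
  match xs with
  | [] => true
  | token :: rest =>
    if token == "--wandb_enabled" then true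
    else if token == "--no-wandb_enabled" then false
    else pvRevScan rest

def is_wandb_enabled_py_alt (args : List String) : Bool :=
  pvRevScan args.reverse

-- ===== PRECONDITION & SPEC =====
def Spec_is_wandb_enabled_py (args : List String) (out : Bool) : Prop := out = is_wandb_enabled_py_alt args
instance (args : List String) (out : Bool) : Decidable (Spec_is_wandb_enabled_py args out) := by unfold Spec_is_wandb_enabled_py; infer_instance

-- ===== CLAIM (what is proved, stated in full; the proofs are below) =====
def Claim_equal_is_wandb_enabled_py : Prop := ∀ (args : List String), Dom_is_wandb_enabled_py args → Spec_is_wandb_enabled_py args (is_wandb_enabled_py args)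

-- ===== LEMMAS AND PROOFS =====

-- pvRevScan with a custom default e at the end
def pvRevScanD (xs : List String) (e : Bool) : Bool :=
  match xs with
  | [] => e
  | token :: rest =>
    if token == "--wandb_enabled" then true
    else if token == "--no-wandb_enabled" then false
    else pvRevScanD rest e

lemma pvRevScanD_true (xs : List String) : pvRevScanD xs true = pvRevScan xs := by
  induction xs with
  | nil => rfl
  | cons t rest ih => simp [pvRevScanD, pvRevScan, ih]

lemma pvRevScanD_append_singleton (xs : List String) (t : String) (e : Bool) :
    pvRevScanD (xs ++ [t]) e =
      pvRevScanD xs (if t == "--no-wandb_enabled" then false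
        else if t == "--wandb_enabled" then true else e) := by
  induction xs with
  | nil =>
    simp only [List.nil_append, pvRevScanD]
    by_cases h1 : t = "--wandb_enabled" <;> by_cases h2 : t = "--no-wandb_enabled" <;>
      simp_all
  | cons s rest ih =>
    simp [pvRevScanD, ih]

lemma foldl_eq_revScanD (xs : List String) (e : Bool) :
    xs.foldl (fun enabled token =>
      if token == "--no-wandb_enabled" then false
      else if token == "--wandb_enabled" then true
      else enabled) e = pvRevScanD xs.reverse e := by
  induction xs generalizing e with
  | nil => rfl
  | cons t rest ih =>
    simp only [List.foldl_cons, List.reverse_cons, ih, pvRevScanD_append_singleton]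

-- ===== VERDICT (by name: the statement is the Claim_ definition above) =====
theorem is_wandb_enabled_py_spec : Claim_equal_is_wandb_enabled_py := by
  intro args _
  unfold Spec_is_wandb_enabled_py is_wandb_enabled_py is_wandb_enabled_py_alt
  rw [foldl_eq_revScanD, pvRevScanD_true]
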